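-- pv_equiv track=rewrite | github.com/inidun/text_analytics | notebooks/co_occurrence/work_in_progress/glove_co_occurrence.py | create_sorted_dictionary
-- ===== SOURCE A (Python) =====
-- def create_sorted_dictionary(sentences):
--     tokens = set()
--     for sentence in sentences:
--         tokens = tokens | set(sentence)
--     tokens = list(tokens)
--     tokens.sort()
--     dictionary = {w: i for i, w in enumerate(tokens)}
--     return dictionary
-- ===== SOURCE B (Python) =====
-- def create_sorted_dictionary(sentences):
--     remaining = {}
--     for sentence in sentences:
--         for token in sentence:
--             remaining[token] = True
--     dictionary = {}
--     index = 0
--     while remaining: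
--         smallest = min(remaining)
--         dictionary[smallest] = index
--         index += 1
--         del remaining[smallest]
--     return dictionary
-- ===== Notes on version B (the rewrite author's own statement) =====
-- stated objective: alternative
-- what changed: Replaces A's per-sentence set-union dedup plus library sort plus enumerate-comprehension with a dict-based dedup pass followed by selection: no sort at all, the dictionary is built by repeatedly extracting the minimum remaining token and assigning the next index.
import Mathlib
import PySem

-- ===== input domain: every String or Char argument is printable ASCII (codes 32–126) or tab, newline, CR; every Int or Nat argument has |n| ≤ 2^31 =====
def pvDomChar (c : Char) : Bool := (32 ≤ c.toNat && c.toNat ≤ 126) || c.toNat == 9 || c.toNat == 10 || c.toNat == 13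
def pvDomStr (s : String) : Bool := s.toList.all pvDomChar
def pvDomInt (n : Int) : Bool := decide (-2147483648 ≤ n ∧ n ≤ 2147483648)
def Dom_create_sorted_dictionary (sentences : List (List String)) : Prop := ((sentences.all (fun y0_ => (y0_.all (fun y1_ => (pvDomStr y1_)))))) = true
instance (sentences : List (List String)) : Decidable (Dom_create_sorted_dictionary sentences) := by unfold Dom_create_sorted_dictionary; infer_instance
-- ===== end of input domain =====

-- B drops A's set-union dedup + library sort + enumerate comprehension: it dedups into a dict and
-- then builds the dictionary by repeatedly extracting the minimum remaining token (selection, no sort).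

-- ===== PORT A =====
def create_sorted_dictionary (sentences : List (List String)) : List (String × Int) :=
  let tokens : PySem.Set String :=
    sentences.foldl (fun acc sentence => PySem.Set.union acc (PySem.Set.ofList sentence)) PySem.Set.empty
  let tokensSorted : List String := PySem.List.sorted tokens (fun x => x) false
  ((PySem.List.enumerate tokensSorted 0).foldl
      (fun d p => PySem.Dict.insert d p.2 p.1) PySem.Dict.empty).items

-- ===== PORT B =====
-- termination helper the port cites: erasing a present key shrinks the dict
theorem csdEraseLt (d : PySem.Dict String Bool) (m : String) (hm : m ∈ d.keys) :
    (d.erase m).size < d.size := by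
  simp only [PySem.Dict.keys, List.mem_map] at hm
  obtain ⟨p, hp, hpm⟩ := hm
  simp only [PySem.Dict.erase, PySem.Dict.size]
  exact List.length_filter_lt_length_iff_exists.mpr ⟨p, hp, by simp [hpm]⟩

-- the 'while remaining:' loop of Source B: extract min(remaining), register it, delete it
def csdSelLoop (remaining : PySem.Dict String Bool) (dict : PySem.Dict String Int) (index : Int) :
    PySem.Dict String Int :=
  match hm : PySem.List.min? remaining.keys (fun x => x) with
  | none => dict
  | some smallest => csdSelLoop (remaining.erase smallest) (dict.insert smallest index) (index + 1)
termination_by remaining.size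
decreasing_by exact csdEraseLt _ _ (PySem.List.min?_mem hm)

def create_sorted_dictionary_alt (sentences : List (List String)) : List (String × Int) :=
  let remaining : PySem.Dict String Bool :=
    sentences.foldl (fun d sentence => sentence.foldl (fun d token => d.insert token true) d)
      PySem.Dict.empty
  (csdSelLoop remaining PySem.Dict.empty 0).items

-- ===== PRECONDITION & SPEC =====
def Spec_create_sorted_dictionary (sentences : List (List String)) (out : List (String × Int)) : Prop := out = create_sorted_dictionary_alt sentences
instance (sentences : List (List String)) (out : List (String × Int)) : Decidable (Spec_create_sorted_dictionary sentences out) := by unfold Spec_create_sorted_dictionary; infer_instance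

-- ===== CLAIM (what is proved, stated in full; the proofs are below) =====
def Claim_equal_create_sorted_dictionary : Prop := ∀ (sentences : List (List String)), Dom_create_sorted_dictionary sentences → Spec_create_sorted_dictionary sentences (create_sorted_dictionary sentences)

-- ===== LEMMAS AND PROOFS =====

-- pair each element with consecutive Int indices starting at i (proof-side model of both dict builds)
def csdEnum (i : Int) : List String → List (String × Int)
  | [] => []
  | x :: r => (x, i) :: csdEnum (i + 1) r

-- A's set-union fold: nodup, and membership = membership in the flattened input
theorem csd_union_fold (ss : List (List String)) (s : PySem.Set String) (hs : s.Nodup) :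
    (ss.foldl (fun acc se => PySem.Set.union acc (PySem.Set.ofList se)) s).Nodup ∧
    ∀ x, x ∈ ss.foldl (fun acc se => PySem.Set.union acc (PySem.Set.ofList se)) s ↔ x ∈ s ∨ x ∈ ss.flatten := by
  induction ss generalizing s with
  | nil => simp [hs]
  | cons se ss ih =>
    obtain ⟨h1, h2⟩ := ih (PySem.Set.union s (PySem.Set.ofList se)) (PySem.Set.nodup_union _ _ hs)
    refine ⟨h1, fun x => ?_⟩
    rw [List.foldl_cons, h2 x, PySem.Set.mem_union, PySem.Set.mem_ofList, List.flatten_cons,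
      List.mem_append]
    tauto

-- A's dict-comprehension fold over enumerate appends the (token, index) pairs in order
theorem csd_enum_fold (L : List String) (d : PySem.Dict String Int) (s : Int)
    (hL : L.Nodup) (hd : ∀ w ∈ L, d.contains w = false) :
    ((PySem.List.enumerate L s).foldl (fun d p => PySem.Dict.insert d p.2 p.1) d).items
      = d.items ++ csdEnum s L := by
  induction L generalizing d s with
  | nil => simp [PySem.List.enumerate_nil, csdEnum]
  | cons t r ih =>
    rw [PySem.List.enumerate_cons, List.foldl_cons]
    have hnc : d.contains t = false := hd t (by simp)
    have := ih (d.insert t s) (s + 1) hL.of_cons (fun w hw => by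
      rw [PySem.Dict.contains_insert]
      have hne : w ≠ t := by
        rintro rfl; exact (List.nodup_cons.mp hL).1 hw
      simp [hne, hd w (by simp [hw])])
    rw [this, PySem.Dict.items_insert_of_not_contains _ _ hnc, csdEnum, List.append_assoc,
      List.singleton_append]

-- keys after erasing a key: the other keys, in order
theorem csd_map_fst_filter (l : List (String × Bool)) (m : String) :
    (l.filter (fun p => !(p.1 == m))).map Prod.fst = (l.map Prod.fst).filter (fun x => !(x == m)) := by
  induction l with
  | nil => rfl
  | cons p r ih => by_cases h : p.1 = m <;> simp [h, ih]

theorem csd_keys_erase (d : PySem.Dict String Bool) (m : String) :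
    (d.erase m).keys = d.keys.filter (fun x => !(x == m)) := by
  simp only [PySem.Dict.erase, PySem.Dict.keys]
  exact csd_map_fst_filter d.items m

-- B's dedup pass: the keys of the nested insert fold are the distinct tokens in first-occurrence order
theorem csd_fill_keys (ss : List (List String)) (d : PySem.Dict String Bool) :
    (ss.foldl (fun d sentence => sentence.foldl (fun d token => d.insert token true) d) d).keys
      = PySem.Set.update d.keys ss.flatten := by
  induction ss generalizing d with
  | nil => simp [PySem.Set.update]
  | cons se ss ih =>
    rw [List.foldl_cons, ih, PySem.Dict.keys_foldl_insert (f := fun _ _ => true)]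
    simp [PySem.Set.update, List.foldl_append]

-- B's selection loop: it emits the sorted remaining keys, indexed consecutively
theorem csd_sel_spec (n : Nat) (remaining : PySem.Dict String Bool) (dict : PySem.Dict String Int)
    (i : Int) (hn : remaining.size = n) (hnd : remaining.keys.Nodup)
    (hdisj : ∀ k ∈ dict.keys, k ∉ remaining.keys) :
    (csdSelLoop remaining dict i).items
      = dict.items ++ csdEnum i (PySem.List.sorted remaining.keys (fun x => x) false) := by
  induction n using Nat.strong_induction_on generalizing remaining dict i with
  | _ n ih =>
  rw [csdSelLoop.eq_def]
  split
  · next hm =>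
    rw [(PySem.List.min?_eq_none_iff _ _).mp hm]
    simp [csdEnum, PySem.List.sorted]
  · next m hm =>
    have hmem : m ∈ remaining.keys := PySem.List.min?_mem hm
    have hmin : ∀ y ∈ remaining.keys, m ≤ y := PySem.List.min?_isMin hm
    have hkerase : (remaining.erase m).keys = remaining.keys.filter (fun x => !(x == m)) :=
      csd_keys_erase remaining m
    have hndE : (remaining.erase m).keys.Nodup := by
      rw [hkerase]; exact hnd.filter _
    -- sorted remaining.keys = m :: sorted (erased keys)
    have hkeyserase : (remaining.erase m).keys = remaining.keys.erase m := by
      rw [hkerase, List.Nodup.erase_eq_filter hnd]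
      apply List.filter_congr
      intro x _
      simp [bne]
    -- sorted remaining.keys = m :: sorted (erased keys)
    have hsorted : PySem.List.sorted remaining.keys (fun x => x) false
        = m :: PySem.List.sorted (remaining.erase m).keys (fun x => x) false := by
      apply PySem.List.sorted_eq_of_perm_of_pairwise_lt
      · refine List.Perm.trans (List.Perm.cons m ?_) (List.perm_cons_erase hmem).symm
        rw [← hkeyserase]
        exact PySem.List.sorted_perm _ _ _
      · constructor
        · intro y hy
          have hyE : y ∈ (remaining.erase m).keys := (PySem.List.sorted_perm _ _ _).mem_iff.mp hy
          rw [hkerase, List.mem_filter] at hyE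
          have hym : y ≠ m := by simpa using hyE.2
          exact lt_of_le_of_ne (hmin y hyE.1) hym.symm
        · have hle := PySem.List.sorted_pairwise (remaining.erase m).keys (fun x => x)
          have hndS : (PySem.List.sorted (remaining.erase m).keys (fun x => x) false).Nodup :=
            ((PySem.List.sorted_perm _ _ _).nodup_iff).mpr hndE
          exact (hle.and hndS).imp (fun h => lt_of_le_of_ne h.1 h.2)
    -- one step of the loop
    have hmnd : dict.contains m = false := by
      cases hb : dict.contains m with
      | false => rfl
      | true => exact absurd hmem (hdisj m ((PySem.Dict.contains_iff_mem_keys dict m).mp hb))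
    have hsz : (remaining.erase m).size < n := hn ▸ csdEraseLt remaining m hmem
    rw [ih _ hsz (remaining.erase m) (dict.insert m i) (i + 1) rfl hndE (fun k hk => by
        rw [PySem.Dict.mem_keys_insert] at hk
        rw [hkerase, List.mem_filter]
        rintro ⟨hk1, hk2⟩
        rcases hk with rfl | hk
        · simp at hk2
        · exact hdisj k hk hk1)]
    rw [hsorted, csdEnum, PySem.Dict.items_insert_of_not_contains _ _ hmnd, List.append_assoc,
      List.singleton_append]

-- ===== VERDICT (by name: the statement is the Claim_ definition above) =====
theorem create_sorted_dictionary_spec : Claim_equal_create_sorted_dictionary := by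
  intro sentences _
  unfold Spec_create_sorted_dictionary create_sorted_dictionary create_sorted_dictionary_alt
  simp only []
  set flat := sentences.flatten with hf
  -- A's set is a nodup list with the members of flat
  obtain ⟨hSn, hSm⟩ := csd_union_fold sentences PySem.Set.empty (List.nodup_nil)
  set S := sentences.foldl (fun acc se => PySem.Set.union acc (PySem.Set.ofList se)) PySem.Set.empty with hS
  have hperm : S.Perm (PySem.Set.ofList flat) := by
    rw [List.perm_ext_iff_of_nodup hSn (PySem.Set.nodup_ofList flat)]
    intro x
    rw [hSm x, PySem.Set.mem_ofList]
    simp [hf, List.mem_flatten]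
  -- B's dedup dict has exactly set(flat) as its keys
  have hkeys : (sentences.foldl
      (fun d sentence => sentence.foldl (fun d token => d.insert token true) d)
      PySem.Dict.empty).keys = PySem.Set.ofList flat := by
    rw [csd_fill_keys, hf]
    simp [PySem.Set.update, PySem.Set.ofList_eq_foldl, PySem.Dict.keys_empty]
  have hA : PySem.List.sorted S (fun x => x) false
      = PySem.List.sorted (PySem.Set.ofList flat) (fun x => x) false :=
    PySem.List.sorted_eq_sorted_of_perm _ _ _ (fun _ _ h => h) hperm
  rw [hA, csd_enum_fold _ PySem.Dict.empty 0
      (((PySem.List.sorted_perm _ _ _).nodup_iff).mpr (PySem.Set.nodup_ofList flat))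
      (fun w _ => PySem.Dict.contains_empty w),
    csd_sel_spec _ _ PySem.Dict.empty 0 rfl (by rw [hkeys]; exact PySem.Set.nodup_ofList flat)
      (by simp [PySem.Dict.keys_empty]), hkeys]
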